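-- pv_equiv track=rewrite | github.com/psvishnu91/interview-problems | leetcode/77_combinations.py | generate_nums_with_mask
-- ===== SOURCE A (Python) =====
-- def generate_nums_with_mask(mask, k):
--     chosen_nums = [None] * k
--     chosen_ix = 0
--     bit_ix = 1
--     while mask:
--         lsb_match = (mask & 1)
--         if lsb_match and chosen_ix < k:
--             chosen_nums[chosen_ix] = bit_ix
--             chosen_ix += 1
--         elif lsb_match and chosen_ix == k:
--             return None
--         mask >>= 1
--         bit_ix += 1
--     return chosen_nums if chosen_ix == k else None
-- ===== SOURCE B (Python) =====
-- def generate_nums_with_mask(mask, k):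
--     positions = []
--     while mask:
--         b = mask & (mask - 1)  # clear the lowest set bit
--         positions.append((mask ^ b).bit_length())
--         mask = b
--     return positions if len(positions) == k else None
-- ===== Notes on version B (the rewrite author's own statement) =====
-- stated objective: faster
-- what changed: B iterates only over the set bits with the clear-lowest-set-bit trick (b = mask & (mask-1), position = (mask ^ b).bit_length()) and compares the collected count to k once at the end (O(popcount) iterations instead of O(bit_length)), instead of A's bit-by-bit shift loop with a fixed-size slot array, a running fill index and an early-exit branch. Pre_ excludes mask < 0, where B's set-bit loop never terminates (A returns None there when k >= 0, and A too never terminates when k < 0).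
-- outside the precondition, e.g. on generate_nums_with_mask(-1, 9): A returns None, B does not finish within the time limit; on generate_nums_with_mask(-5, 0): A returns None, B does not finish within the time limit
import Mathlib
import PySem

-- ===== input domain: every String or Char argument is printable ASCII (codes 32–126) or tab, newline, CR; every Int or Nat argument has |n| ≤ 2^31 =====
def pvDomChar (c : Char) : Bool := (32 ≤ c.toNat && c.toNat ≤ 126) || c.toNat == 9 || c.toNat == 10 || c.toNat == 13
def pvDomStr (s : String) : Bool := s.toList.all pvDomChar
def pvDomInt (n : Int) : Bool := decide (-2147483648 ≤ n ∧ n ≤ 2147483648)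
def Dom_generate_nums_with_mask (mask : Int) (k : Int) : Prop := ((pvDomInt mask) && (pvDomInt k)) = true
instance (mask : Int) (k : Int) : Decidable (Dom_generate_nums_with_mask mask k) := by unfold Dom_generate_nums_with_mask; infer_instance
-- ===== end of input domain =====

-- B replaces A's bit-by-bit shift scan (slot array + fill index + early exit) by a loop over the
-- set bits only, via the clear-lowest-set-bit trick, checking the count against k once at the end.

-- Termination helpers for the two loops (cited by name in decreasing_by).
theorem pv_shiftRight_one_toNat_lt (mask : Int) (h0 : ¬ mask = 0) (h1 : ¬ mask < 0) :
    (mask >>> (1 : Nat)).toNat < mask.toNat := by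
  obtain ⟨n, rfl⟩ := Int.eq_ofNat_of_zero_le (by omega : (0:Int) ≤ mask)
  have he : ((n : Int) >>> (1 : Nat)) = ((n >>> 1 : Nat) : Int) := rfl
  rw [he]
  simp only [Int.toNat_natCast, Nat.shiftRight_one]
  omega

theorem pv_band_pred_toNat_lt (mask : Int) (h0 : ¬ mask = 0) (h1 : ¬ mask < 0) :
    (PySem.Int.band mask (mask - 1)).toNat < mask.toNat := by
  obtain ⟨n, rfl⟩ := Int.eq_ofNat_of_zero_le (by omega : (0:Int) ≤ mask)
  have hn : 0 < n := by omega
  have hc : ((n : Int) - 1) = ((n - 1 : Nat) : Int) := by omega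
  rw [hc, PySem.Int.band_natCast]
  have := Nat.and_le_right (n := n) (m := n - 1)
  simp only [Int.toNat_natCast]
  omega

-- ===== PORT A =====
-- chosen_nums is filled left to right at chosen_ix, so it is modelled as the filled prefix
-- (writing chosen_nums[chosen_ix] and incrementing chosen_ix = appending to the prefix).
-- mask & 1 → PySem.Int.band, mask >>= 1 → >>> (exact on all ints).
-- The 'mask < 0' branch is a totality guard (outside Pre_generate_nums_with_mask): there Python
-- returns None when k ≥ 0 (the sign bits keep supplying set bits past k) and never terminates
-- when k < 0; the branch returns none, matching Python wherever Python returns.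
def pvGoA (mask : Int) (chosenNums : List Int) (chosenIx : Int) (bitIx : Int) (k : Int) :
    Option (List Int) :=
  if _h0 : mask = 0 then (if chosenIx = k then some chosenNums else none)
  else if _h1 : mask < 0 then none
  else
    let lsbMatch := PySem.Int.band mask 1
    if lsbMatch ≠ 0 ∧ chosenIx < k then
      pvGoA (mask >>> (1 : Nat)) (chosenNums ++ [bitIx]) (chosenIx + 1) (bitIx + 1) k
    else if lsbMatch ≠ 0 ∧ chosenIx = k then none
    else pvGoA (mask >>> (1 : Nat)) chosenNums chosenIx (bitIx + 1) k
termination_by mask.toNat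
decreasing_by all_goals exact pv_shiftRight_one_toNat_lt mask _h0 _h1

def generate_nums_with_mask (mask : Int) (k : Int) : Option (List Int) :=
  pvGoA mask [] 0 1 k

-- ===== PORT B =====
-- b = mask & (mask - 1) clears the lowest set bit; (mask ^ b).bit_length() is its 1-based
-- position (PySem.Int.band/bxor/bitLength are Python-exact).  The 'mask < 0' branch is the same
-- 'mask < 0' branch is a totality guard (outside
-- Pre_generate_nums_with_mask): Python B's loop never terminates for mask < 0.
def pvGoB (mask : Int) (positions : List Int) : List Int :=
  if _h0 : mask = 0 then positions
  else if _h1 : mask < 0 then positions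
  else
    let b := PySem.Int.band mask (mask - 1)
    pvGoB b (positions ++ [((PySem.Int.bitLength (PySem.Int.bxor mask b) : Nat) : Int)])
termination_by mask.toNat
decreasing_by exact pv_band_pred_toNat_lt mask _h0 _h1

def generate_nums_with_mask_alt (mask : Int) (k : Int) : Option (List Int) :=
  let positions := pvGoB mask []
  if ((positions.length : Int) = k) then some positions else none

-- ===== PRECONDITION & SPEC =====
-- Pre_ excludes mask < 0, where B's set-bit loop never terminates: A there returns None when
-- k ≥ 0 and itself never terminates when k < 0, so B has no value to match.
def Pre_generate_nums_with_mask (mask : Int) (k : Int) : Prop := 0 ≤ mask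
instance (mask : Int) (k : Int) : Decidable (Pre_generate_nums_with_mask mask k) := by
  unfold Pre_generate_nums_with_mask; infer_instance

def pvWitness_generate_nums_with_mask : Int × Int := (5, 2)

def Spec_generate_nums_with_mask (mask : Int) (k : Int) (out : Option (List Int)) : Prop :=
  out = generate_nums_with_mask_alt mask k
instance (mask : Int) (k : Int) (out : Option (List Int)) :
    Decidable (Spec_generate_nums_with_mask mask k out) := by
  unfold Spec_generate_nums_with_mask; infer_instance

-- ===== CLAIM (what is proved, stated in full; the proofs are below) =====
def Claim_equal_generate_nums_with_mask : Prop :=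
  ∀ (mask : Int) (k : Int), Dom_generate_nums_with_mask mask k →
    Pre_generate_nums_with_mask mask k →
    Spec_generate_nums_with_mask mask k (generate_nums_with_mask mask k)

-- ===== LEMMAS AND PROOFS =====

-- The 1-based positions of the set bits of n, low to high: the common characterisation
-- both loops are reduced to.
def pvBits (n : Nat) (bit : Int) : List Int :=
  if n = 0 then [] else (if n % 2 = 1 then [bit] else []) ++ pvBits (n / 2) (bit + 1)
termination_by n
decreasing_by omega

theorem pvBits_zero (bit : Int) : pvBits 0 bit = [] := by simp [pvBits]

theorem pvBits_two_mul (m : Nat) (bit : Int) : pvBits (2 * m) bit = pvBits m (bit + 1) := by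
  rcases Nat.eq_zero_or_pos m with rfl | hm
  · simp [pvBits]
  · rw [pvBits]
    have h2 : ¬ (2 * m = 0) := by omega
    have h3 : ¬ (2 * m % 2 = 1) := by omega
    have h4 : 2 * m / 2 = m := by omega
    simp [h2, h3, h4]

theorem pvBits_odd (m : Nat) (bit : Int) : pvBits (2 * m + 1) bit = bit :: pvBits m (bit + 1) := by
  rw [pvBits]
  have h2 : ¬ (2 * m + 1 = 0) := by omega
  have h3 : (2 * m + 1) % 2 = 1 := by omega
  have h4 : (2 * m + 1) / 2 = m := by omega
  simp [h2, h3, h4]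

-- Bit identities on Nat, by testBit extensionality.
theorem pv_land_mul2_succ (a b : Nat) : (2 * a + 1) &&& (2 * b) = 2 * (a &&& b) := by
  apply Nat.eq_of_testBit_eq; intro i
  cases i with
  | zero => simp [Nat.testBit_zero, Nat.mul_mod_right, Nat.mul_add_mod]
  | succ i =>
    have h1 : (2 * a + 1) / 2 = a := by omega
    have h2 : 2 * b / 2 = b := by omega
    have h3 : 2 * (a &&& b) / 2 = a &&& b := by omega
    rw [Nat.testBit_land]; simp only [Nat.testBit_land, Nat.testBit_succ, h1, h2, h3]

theorem pv_xor_mul2 (a b : Nat) : (2 * a) ^^^ (2 * b) = 2 * (a ^^^ b) := by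
  apply Nat.eq_of_testBit_eq; intro i
  cases i with
  | zero => simp [Nat.testBit_zero, Nat.mul_mod_right]
  | succ i =>
    have h1 : 2 * a / 2 = a := by omega
    have h2 : 2 * b / 2 = b := by omega
    have h3 : 2 * (a ^^^ b) / 2 = a ^^^ b := by omega
    rw [Nat.testBit_xor]; simp only [Nat.testBit_xor, Nat.testBit_succ, h1, h2, h3]

theorem pv_xor_mul2_succ (a b : Nat) : (2 * a + 1) ^^^ (2 * b) = 2 * (a ^^^ b) + 1 := by
  apply Nat.eq_of_testBit_eq; intro i
  cases i with
  | zero => simp [Nat.testBit_zero, Nat.mul_mod_right, Nat.mul_add_mod]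
  | succ i =>
    have h1 : (2 * a + 1) / 2 = a := by omega
    have h2 : 2 * b / 2 = b := by omega
    have h3 : (2 * (a ^^^ b) + 1) / 2 = a ^^^ b := by omega
    rw [Nat.testBit_xor]; simp only [Nat.testBit_xor, Nat.testBit_succ, h1, h2, h3]

theorem pv_land_pred_odd (m : Nat) : (2 * m + 1) &&& (2 * m) = 2 * m := by
  rw [pv_land_mul2_succ, Nat.and_self]

theorem pv_xor_pred_odd (m : Nat) : (2 * m + 1) ^^^ (2 * m) = 1 := by
  rw [pv_xor_mul2_succ, Nat.xor_self]

theorem pv_land_pred_even (m : Nat) (hm : 0 < m) :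
    (2 * m) &&& (2 * m - 1) = 2 * (m &&& (m - 1)) := by
  have h : 2 * m - 1 = 2 * (m - 1) + 1 := by omega
  rw [h, Nat.land_comm, pv_land_mul2_succ, Nat.land_comm]

-- Key step: pvBits n bit starts with the position of the lowest set bit and continues with the
-- bits of n with that bit cleared (n &&& (n-1)).
theorem pvBits_lsb (n : Nat) (h : 0 < n) : ∀ bit : Int,
    pvBits n bit =
      (bit - 1 + ((PySem.Int.bitLength ((n ^^^ (n &&& (n - 1)) : Nat) : Int) : Nat) : Int))
        :: pvBits (n &&& (n - 1)) bit := by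
  induction n using Nat.strong_induction_on with
  | _ n ih =>
  intro bit
  rcases Nat.even_or_odd n with he | ho
  · -- even n = 2*m, m > 0
    obtain ⟨m, hm⟩ := he
    have hm2 : n = 2 * m := by omega
    subst hm2
    have hmpos : 0 < m := by omega
    have hland := pv_land_pred_even m hmpos
    have hxor : (2 * m) ^^^ (2 * (m &&& (m - 1))) = 2 * (m ^^^ (m &&& (m - 1))) :=
      pv_xor_mul2 m (m &&& (m - 1))
    have hlsbpos : 0 < m ^^^ (m &&& (m - 1)) := by
      have hle := Nat.and_le_right (n := m) (m := m - 1)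
      rcases Nat.eq_zero_or_pos (m ^^^ (m &&& (m - 1))) with hz | hp
      · have := Nat.xor_eq_zero_iff.mp hz; omega
      · exact hp
    have hbl : PySem.Int.bitLength ((2 * (m ^^^ (m &&& (m - 1))) : Nat) : Int)
        = PySem.Int.bitLength ((m ^^^ (m &&& (m - 1)) : Nat) : Int) + 1 := by
      have := PySem.Int.bitLength_natCast (m := 2 * (m ^^^ (m &&& (m - 1)))) (by omega)
      have hd : 2 * (m ^^^ (m &&& (m - 1))) / 2 = m ^^^ (m &&& (m - 1)) := by omega
      rw [hd] at this; exact this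
    rw [pvBits_two_mul, ih m (by omega) hmpos (bit + 1), hland, hxor, hbl,
        pvBits_two_mul (m &&& (m - 1)) bit]
    congr 1
    push_cast
    ring
  · -- odd n = 2*m + 1
    obtain ⟨m, hm⟩ := ho
    subst hm
    have hpred : 2 * m + 1 - 1 = 2 * m := by omega
    rw [hpred, pv_land_pred_odd, pv_xor_pred_odd, pvBits_odd, pvBits_two_mul]
    congr 1
    have h1 : (PySem.Int.bitLength ((1 : Nat) : Int)) = 1 := by decide
    rw [h1]
    push_cast
    ring

-- Loop B collects exactly pvBits mask.toNat 1 after its starting positions.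
theorem pvGoB_eq (n : Nat) : ∀ pos : List Int, pvGoB (n : Int) pos = pos ++ pvBits n 1 := by
  induction n using Nat.strong_induction_on with
  | _ n ih =>
  intro pos
  rcases Nat.eq_zero_or_pos n with rfl | hn
  · rw [pvGoB]; simp [pvBits_zero]
  · rw [pvGoB]
    have h0 : ¬ ((n : Int) = 0) := by exact_mod_cast by omega
    have h1 : ¬ ((n : Int) < 0) := by exact_mod_cast by omega
    have hc : ((n : Int) - 1) = ((n - 1 : Nat) : Int) := by omega
    simp only [h0, h1, dif_neg, not_false_iff, hc, PySem.Int.band_natCast,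
      PySem.Int.bxor_natCast]
    rw [ih (n &&& (n - 1)) (by have := Nat.and_le_right (n := n) (m := n - 1); omega)]
    rw [pvBits_lsb n hn 1]
    simp

-- Loop A with fill index cnt ≤ k returns the bits list iff it completes the count to exactly k.
theorem pvGoA_le (n : Nat) : ∀ (acc : List Int) (cnt bit k : Int), cnt ≤ k →
    pvGoA (n : Int) acc cnt bit k =
      if cnt + ((pvBits n bit).length : Int) = k then some (acc ++ pvBits n bit) else none := by
  induction n using Nat.strong_induction_on with
  | _ n ih =>
  intro acc cnt bit k hle
  rcases Nat.eq_zero_or_pos n with rfl | hn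
  · rw [pvGoA]; simp [pvBits_zero]
  · rw [pvGoA]
    have h0 : ¬ ((n : Int) = 0) := by exact_mod_cast by omega
    have h1 : ¬ ((n : Int) < 0) := by exact_mod_cast by omega
    have hband : PySem.Int.band (n : Int) 1 = ((n &&& 1 : Nat) : Int) := by
      exact_mod_cast PySem.Int.band_natCast n 1
    have hand1 : n &&& 1 = n % 2 := Nat.and_one_is_mod n
    have hshift : ((n : Int) >>> (1 : Nat)) = ((n / 2 : Nat) : Int) := by
      have he : ((n : Int) >>> (1 : Nat)) = ((n >>> 1 : Nat) : Int) := rfl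
      rw [he, Nat.shiftRight_one]
    rcases Nat.even_or_odd n with hev | hod
    · -- even: lsb_match = 0, skip the bit
      obtain ⟨m, hm⟩ := hev
      have hm2 : n = 2 * m := by omega
      have hmod : n % 2 = 0 := by omega
      have hcond : ¬ (((n &&& 1 : Nat) : Int) ≠ 0 ∧ cnt < k) := by
        rw [hand1, hmod]; simp
      have hcond2 : ¬ (((n &&& 1 : Nat) : Int) ≠ 0 ∧ cnt = k) := by
        rw [hand1, hmod]; simp
      simp only [h0, h1, dif_neg, not_false_iff, hband, hcond, hcond2, if_neg, if_false]
      rw [hshift, ih (n / 2) (by omega) acc cnt (bit + 1) k hle]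
      have hb : pvBits n bit = pvBits (n / 2) (bit + 1) := by
        rw [hm2]
        have : 2 * m / 2 = m := by omega
        rw [this, pvBits_two_mul]
      rw [hb]
    · -- odd: lsb_match = 1
      obtain ⟨m, hm⟩ := hod
      have hmod : n % 2 = 1 := by omega
      have hdiv : n / 2 = m := by omega
      have hb : pvBits n bit = bit :: pvBits m (bit + 1) := by rw [hm, pvBits_odd]
      rcases lt_or_eq_of_le hle with hlt | heq
      · have hcond : (((n &&& 1 : Nat) : Int) ≠ 0 ∧ cnt < k) := by
          rw [hand1, hmod]; exact ⟨by norm_num, hlt⟩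
        simp only [h0, h1, dif_neg, not_false_iff, hband]
        rw [if_pos hcond, hshift, hdiv,
          ih m (by omega) (acc ++ [bit]) (cnt + 1) (bit + 1) k (by omega), hb]
        simp only [List.append_assoc, List.singleton_append, List.length_cons]
        push_cast
        split_ifs with hA hB hB
        · rfl
        · omega
        · omega
        · rfl
      · -- cnt = k and another set bit: A returns None early, and the total count exceeds k
        subst heq
        simp only [h0, h1, dif_neg, not_false_iff, hband]
        rw [if_neg (by rw [hand1, hmod]; simp), if_pos (by rw [hand1, hmod]; norm_num)]
        rw [hb, if_neg (by push_cast [List.length_cons]; omega)]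

-- With the fill index already past k (k < 0 at the start), A always returns None.
theorem pvGoA_gt (n : Nat) : ∀ (acc : List Int) (cnt bit k : Int), k < cnt →
    pvGoA (n : Int) acc cnt bit k = none := by
  induction n using Nat.strong_induction_on with
  | _ n ih =>
  intro acc cnt bit k hgt
  rcases Nat.eq_zero_or_pos n with rfl | hn
  · rw [pvGoA]; simp; omega
  · rw [pvGoA]
    have h0 : ¬ ((n : Int) = 0) := by exact_mod_cast by omega
    have h1 : ¬ ((n : Int) < 0) := by exact_mod_cast by omega
    have hshift : ((n : Int) >>> (1 : Nat)) = ((n / 2 : Nat) : Int) := by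
      have he : ((n : Int) >>> (1 : Nat)) = ((n >>> 1 : Nat) : Int) := rfl
      rw [he, Nat.shiftRight_one]
    have hcond : ¬ (PySem.Int.band (n : Int) 1 ≠ 0 ∧ cnt < k) := by
      intro h; exact absurd h.2 (by omega)
    have hcond2 : ¬ (PySem.Int.band (n : Int) 1 ≠ 0 ∧ cnt = k) := by
      intro h; exact absurd h.2 (by omega)
    simp only [h0, h1, dif_neg, not_false_iff, hcond, hcond2, if_neg, if_false]
    rw [hshift, ih (n / 2) (by omega) acc cnt (bit + 1) k hgt]

-- ===== VERDICT (by name: the statement is the Claim_ definition above) =====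
theorem generate_nums_with_mask_spec : Claim_equal_generate_nums_with_mask := by
  intro mask k _hdom hpre
  unfold Spec_generate_nums_with_mask generate_nums_with_mask generate_nums_with_mask_alt
  obtain ⟨n, rfl⟩ := Int.eq_ofNat_of_zero_le hpre
  rw [pvGoB_eq n []]
  simp only [List.nil_append]
  by_cases hk : (0 : Int) ≤ k
  · rw [pvGoA_le n [] 0 1 k hk]
    simp
  · rw [pvGoA_gt n [] 0 1 k (by omega)]
    have : ¬ (((pvBits n 1).length : Int) = k) := by
      have : (0 : Int) ≤ ((pvBits n 1).length : Int) := by positivity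
      omega
    rw [if_neg this]
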